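-- pv_equiv track=rewrite | github.com/HumanGeneticsResearchGroupRCSI/ExpansionHunter_STRIPY | scripts/build_sample_report.py | parse_multi_disease
-- ===== SOURCE A (Python) =====
-- def parse_multi_disease(info: dict) -> list:
--     """
--     Expand multi-disease INFO fields into list of per-disease dicts.
--     Returns single empty entry if locus not in Stripy DB (no DISID).
--     """
--     if 'DISID' not in info:
--         return [{"dis_id": None, "dis_name": None,
--                  "disinher": None, "dis_range": None}]
--
--     dis_ids    = info.get('DISID',    '').split(',')
--     dis_names  = [n.replace('_', ' ')
--                   for n in info.get('DISNAME', '').split(',')]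
--     dis_inher  = info.get('DISINHER', '').split(',')
--     dis_ranges = info.get('DISRANGE', '').split(',')
--
--     n = len(dis_ids)
--
--     def pad(lst):
--         return lst + [None] * (n - len(lst))
--
--     return [
--         {
--             "dis_id":    dis_ids[i],
--             "dis_name":  pad(dis_names)[i],
--             "disinher":  pad(dis_inher)[i],
--             "dis_range": pad(dis_ranges)[i],
--         }
--         for i in range(n)
--     ]
-- ===== SOURCE B (Python) =====
-- def parse_multi_disease(info: dict) -> list:
--     """Field-major rewrite: build skeleton rows, then fill each field column-wise."""
--     if 'DISID' not in info:
--         return [{"dis_id": None, "dis_name": None,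
--                  "disinher": None, "dis_range": None}]
--
--     dis_ids = info.get('DISID', '').split(',')
--     n = len(dis_ids)
--     rows = [{"dis_id": None, "dis_name": None,
--              "disinher": None, "dis_range": None} for _ in range(n)]
--
--     fields = [
--         ("dis_id", dis_ids),
--         ("dis_name", [x.replace('_', ' ')
--                       for x in info.get('DISNAME', '').split(',')]),
--         ("disinher", info.get('DISINHER', '').split(',')),
--         ("dis_range", info.get('DISRANGE', '').split(',')),
--     ]
--     for key, vals in fields:
--         for i, v in enumerate(vals[:n]):
--             rows[i][key] = v
--     return rows
-- ===== Notes on version B (the rewrite author's own statement) =====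
-- stated objective: alternative
-- what changed: A builds each per-disease dict record-major in one comprehension, padding every value list to length n; B builds n skeleton dicts first and then fills them field-major, looping over the four (key, values) columns truncated to n.
import Mathlib
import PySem

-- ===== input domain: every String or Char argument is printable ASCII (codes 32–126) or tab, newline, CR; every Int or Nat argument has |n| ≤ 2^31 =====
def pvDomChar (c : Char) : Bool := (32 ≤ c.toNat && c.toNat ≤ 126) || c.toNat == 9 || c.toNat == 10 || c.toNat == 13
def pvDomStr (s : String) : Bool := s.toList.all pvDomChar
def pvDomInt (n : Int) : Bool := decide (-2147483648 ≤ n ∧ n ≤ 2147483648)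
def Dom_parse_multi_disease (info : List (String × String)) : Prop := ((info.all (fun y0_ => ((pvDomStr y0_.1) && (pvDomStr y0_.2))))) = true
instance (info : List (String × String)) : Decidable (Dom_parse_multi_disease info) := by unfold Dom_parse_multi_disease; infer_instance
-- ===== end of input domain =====

-- B builds the same per-disease records field-major (skeletons then column fill) instead of A's record-major comprehension with padding.

-- ===== PORT A =====

-- info.get(k, d) with dict as assoc list (first match)
def pmdGet (info : List (String × String)) (k d : String) : String :=
  (List.lookup k info).getD d

-- s.split(',') ; the separator is the nonempty literal "," so split? is always some
def pmdSplit (s : String) : List String :=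
  (PySem.Str.split? s ",").getD []

-- pad(lst): lst + [None] * (n - len(lst)), over already-Option-lifted values
def pmdPad (n : Nat) (lst : List (Option String)) : List (Option String) :=
  lst ++ List.replicate (n - lst.length) none

def parse_multi_disease (info : List (String × String)) : List (List (String × Option String)) :=
  if (List.lookup "DISID" info).isNone then
    [[("dis_id", none), ("dis_name", none), ("disinher", none), ("dis_range", none)]]
  else
    let dis_ids := pmdSplit (pmdGet info "DISID" "")
    let dis_names := (pmdSplit (pmdGet info "DISNAME" "")).map (fun s => PySem.Str.replace s "_" " ")
    let dis_inher := pmdSplit (pmdGet info "DISINHER" "")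
    let dis_ranges := pmdSplit (pmdGet info "DISRANGE" "")
    let n := dis_ids.length
    (List.range n).map (fun i =>
      [("dis_id", dis_ids[i]?),
       ("dis_name", (pmdPad n (dis_names.map some)).getD i none),
       ("disinher", (pmdPad n (dis_inher.map some)).getD i none),
       ("dis_range", (pmdPad n (dis_ranges.map some)).getD i none)])

-- ===== PORT B =====

-- rows[i][key] = v   (dict update in place: overwrite the matching key, order kept)
def pmdSetRow (row : List (String × Option String)) (key : String) (v : String) : List (String × Option String) :=
  row.map (fun kv => if kv.1 = key then (kv.1, some v) else kv)

-- for i, v in enumerate(vals): rows[i][key] = v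
def pmdFill (rows : List (List (String × Option String))) (key : String) (vals : List String) :
    List (List (String × Option String)) :=
  (vals.zipIdx).foldl (fun rs p => rs.modify p.2 (fun row => pmdSetRow row key p.1)) rows

def parse_multi_disease_alt (info : List (String × String)) : List (List (String × Option String)) :=
  if (List.lookup "DISID" info).isNone then
    [[("dis_id", none), ("dis_name", none), ("disinher", none), ("dis_range", none)]]
  else
    let dis_ids := pmdSplit (pmdGet info "DISID" "")
    let n := dis_ids.length
    let rows := (List.range n).map (fun _ =>
      [("dis_id", none), ("dis_name", none), ("disinher", none), ("dis_range", none)])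
    let fields := [("dis_id", dis_ids),
                   ("dis_name", (pmdSplit (pmdGet info "DISNAME" "")).map (fun s => PySem.Str.replace s "_" " ")),
                   ("disinher", pmdSplit (pmdGet info "DISINHER" "")),
                   ("dis_range", pmdSplit (pmdGet info "DISRANGE" ""))]
    fields.foldl (fun rs kv => pmdFill rs kv.1 (kv.2.take n)) rows

-- ===== PRECONDITION & SPEC =====
def Spec_parse_multi_disease (info : List (String × String)) (out : List (List (String × Option String))) : Prop := out = parse_multi_disease_alt info
instance (info : List (String × String)) (out : List (List (String × Option String))) : Decidable (Spec_parse_multi_disease info out) := by unfold Spec_parse_multi_disease; infer_instance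

-- ===== CLAIM (what is proved, stated in full; the proofs are below) =====
def Claim_equal_parse_multi_disease : Prop := ∀ (info : List (String × String)), Dom_parse_multi_disease info → Spec_parse_multi_disease info (parse_multi_disease info)

-- ===== LEMMAS AND PROOFS =====

-- applying one enumerate-fill step's effect at index i, as a function of vals[i]?
def pmdApply (key : String) (ov : Option String) (row : List (String × Option String)) : List (String × Option String) :=
  match ov with
  | some v => pmdSetRow row key v
  | none => row

theorem pmdFill_getElem? (rows : List (List (String × Option String))) (key : String)
    (vals : List String) (i : Nat) :
    (pmdFill rows key vals)[i]? = rows[i]?.map (pmdApply key vals[i]?) := by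
  unfold pmdFill
  have main : ∀ (vs : List String) (k : Nat) (rows : List (List (String × Option String))),
      ((vs.zipIdx k).foldl (fun rs p => rs.modify p.2 (fun row => pmdSetRow row key p.1)) rows)[i]? =
      if i < k then rows[i]? else rows[i]?.map (pmdApply key vs[i - k]?) := by
    intro vs
    induction vs with
    | nil =>
      intro k rows
      simp
      intro _
      cases rows[i]? <;> rfl
    | cons v vs ih =>
      intro k rows
      simp only [List.zipIdx, List.foldl_cons]
      rw [ih]
      rcases lt_trichotomy i k with h | h | h
      · rw [if_pos (Nat.lt_succ_of_lt h), if_pos h]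
        simp [Nat.ne_of_gt h]
      · subst h
        rw [if_pos (Nat.lt_succ_self i), if_neg (lt_irrefl i)]
        simp [pmdApply, Option.map]
      · rw [if_neg (by omega), if_neg (by omega)]
        have h1 : ((v :: vs) : List String)[i - k]? = vs[i - k - 1]? := by
          have hm : i - k = (i - k - 1) + 1 := by omega
          rw [hm]
          simp
        rw [h1]
        have h2 : i - (k + 1) = i - k - 1 := by omega
        rw [h2]
        simp [Nat.ne_of_lt h]
  rw [main vals 0 rows]
  simp

theorem pmdPad_getD (lst : List String) (n i : Nat) :
    (pmdPad n (lst.map some)).getD i none = lst[i]? := by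
  unfold pmdPad
  rw [List.getD_eq_getElem?_getD, List.getElem?_append]
  by_cases hi : i < lst.length
  · rw [if_pos (by simpa using hi)]
    simp [hi]
  · rw [if_neg (by simpa using hi)]
    have hr : lst[i]? = none := List.getElem?_eq_none (Nat.le_of_not_lt hi)
    rw [hr, List.getElem?_replicate]
    split <;> rfl

theorem parse_multi_disease_eq (info : List (String × String)) :
    parse_multi_disease info = parse_multi_disease_alt info := by
  unfold parse_multi_disease parse_multi_disease_alt
  by_cases hd : (List.lookup "DISID" info).isNone
  · rw [if_pos hd, if_pos hd]
  · rw [if_neg hd, if_neg hd]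
    set ids := pmdSplit (pmdGet info "DISID" "") with hids
    set names := (pmdSplit (pmdGet info "DISNAME" "")).map (fun s => PySem.Str.replace s "_" " ") with hnames
    set inher := pmdSplit (pmdGet info "DISINHER" "") with hinher
    set ranges := pmdSplit (pmdGet info "DISRANGE" "") with hranges
    set n := ids.length with hn
    simp only [List.foldl_cons, List.foldl_nil]
    apply List.ext_getElem?
    intro i
    rw [List.getElem?_map]
    rw [pmdFill_getElem?, pmdFill_getElem?, pmdFill_getElem?, pmdFill_getElem?]
    by_cases hi : i < n
    · rw [List.getElem?_range hi, List.getElem?_map, List.getElem?_range hi]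
      simp only [Option.map_some]
      have htake : ∀ (l : List String), (l.take n)[i]? = l[i]? := by
        intro l; rw [List.getElem?_take]; rw [if_pos hi]
      rw [htake, htake, htake, htake]
      rw [pmdPad_getD names n i, pmdPad_getD inher n i, pmdPad_getD ranges n i]
      congr 1
      have hlt : i < ids.length := hn ▸ hi
      rw [List.getElem?_eq_getElem hlt]
      cases h2 : names[i]? <;> cases h3 : inher[i]? <;> cases h4 : ranges[i]? <;>
        simp [pmdApply, pmdSetRow]
    · have hni : n ≤ i := Nat.le_of_not_lt hi
      have h1 : (List.range n)[i]? = none := List.getElem?_eq_none (by simpa using hni)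
      rw [List.getElem?_map, h1]
      simp

-- ===== VERDICT (by name: the statement is the Claim_ definition above) =====
theorem parse_multi_disease_spec : Claim_equal_parse_multi_disease := by
  intro info _
  unfold Spec_parse_multi_disease
  exact parse_multi_disease_eq info
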